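-- pv_equiv track=rewrite | github.com/va64doman/codility | Challenges/jurassicCode.py | largestBalancedRadius
-- ===== SOURCE A (Python) =====
-- def largestBalancedRadius(X, Y, colors):
--     N = len(X)
--     ans = 0
--     tab = []
--     for i in range(N):
--         r2 = X[i]**2 + Y[i]**2
--         tab.append((r2, colors[i] == 'R'))
--     tab.sort()
--     cnt = red = 0
--     for i in range(N):
--         cnt += 1
--         red += tab[i][1]
--         if red * 2 == cnt and (i == N-1 or tab[i][0] != tab[i+1][0]): ans = max(ans, cnt)
--     return ans
--     pass
-- ===== SOURCE B (Python) =====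
-- def largestBalancedRadius(X, Y, colors):
--     pts = sorted((x * x + y * y, 1 if c == 'R' else -1) for x, y, c in zip(X, Y, colors))
--     bal = sum(s for _, s in pts)
--     n = len(pts)
--     while n > 0:
--         if bal == 0:
--             return n
--         r = pts[n - 1][0]
--         while n > 0 and pts[n - 1][0] == r:
--             bal -= pts[n - 1][1]
--             n -= 1
--     return 0
-- ===== Notes on version B (the rewrite author's own statement) =====
-- stated objective: alternative
-- what changed: B encodes colors as +1/-1 signs, computes the total signed balance once, and scans the sorted points BACKWARDS from the outermost radius, removing whole radius groups and returning at the first balanced prefix (early exit, no max accumulator, no per-prefix red counter), instead of A's ascending per-element scan that tracks a red count, tests red*2==cnt with a boundary lookahead and keeps a running max.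
import Mathlib
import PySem

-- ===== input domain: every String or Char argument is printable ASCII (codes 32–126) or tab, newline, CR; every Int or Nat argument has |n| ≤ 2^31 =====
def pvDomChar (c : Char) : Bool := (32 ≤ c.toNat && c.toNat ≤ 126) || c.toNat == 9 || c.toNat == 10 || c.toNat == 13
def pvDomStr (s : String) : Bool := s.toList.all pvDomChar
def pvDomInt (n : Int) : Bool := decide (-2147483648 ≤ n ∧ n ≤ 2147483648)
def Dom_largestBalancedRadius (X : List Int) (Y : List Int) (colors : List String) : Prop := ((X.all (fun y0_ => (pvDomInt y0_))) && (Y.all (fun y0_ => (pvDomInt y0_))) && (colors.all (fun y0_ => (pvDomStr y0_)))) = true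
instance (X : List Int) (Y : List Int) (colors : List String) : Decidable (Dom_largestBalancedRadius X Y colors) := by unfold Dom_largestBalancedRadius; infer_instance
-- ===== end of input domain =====

-- B maps colors to ±1 signs, sorts by squared radius, computes the total signed balance once,
-- and scans BACKWARDS from the outermost radius, removing whole radius groups and returning at
-- the first (hence largest) balanced prefix — no max accumulator, no per-prefix red counter
-- (alternative decomposition, same return value).

-- ===== PORT A =====
-- the indexed scan over the sorted table, with A's lookahead boundary test (tab[i+1] = rest.headI)
def lbrScan : List (Int × Int) → Int → Int → Int → Int
  | [], _, _, ans => ans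
  | p :: rest, cnt, red, ans =>
    lbrScan rest (cnt + 1) (red + p.2)
      (if (red + p.2) * 2 = cnt + 1 ∧ (rest = [] ∨ rest.headI.1 ≠ p.1) then max ans (cnt + 1) else ans)

def largestBalancedRadius (X : List Int) (Y : List Int) (colors : List String) : Int :=
  let N : Int := X.length
  let tab := (PySem.List.pyRange 0 N 1).foldl
    (fun t i => t ++ [(PySem.List.pyGetD X i 0 ^ 2 + PySem.List.pyGetD Y i 0 ^ 2,
                       if PySem.List.pyGetD colors i "" = "R" then (1 : Int) else 0)]) []
  -- tab.sort(): Python sorts the (r2, bool) tuples lexicographically; the bool is 0/1 here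
  lbrScan (PySem.List.sorted2 tab (fun p => p.1) (fun p => p.2) false) 0 0 0

-- ===== PORT B =====
-- the inner while loop: drop the whole trailing radius group (list is traversed back-to-front,
-- so the port recurses over the REVERSED sorted list), subtracting its signs from bal
def bDropGroup (r : Int) : List (Int × Int) → Int → List (Int × Int) × Int
  | [], bal => ([], bal)
  | p :: rest, bal => if p.1 = r then bDropGroup r rest (bal - p.2) else (p :: rest, bal)

-- the outer while loop over the reversed (descending) list; the Nat argument is pure fuel
-- (initially the list length; each iteration drops at least one element, so it never runs out)
def bLoop : Nat → List (Int × Int) → Int → Int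
  | _, [], _ => 0
  | 0, _ :: _, _ => 0
  | fuel + 1, p :: rest, bal =>
    if bal = 0 then (((p :: rest).length : Nat) : Int)
    else bLoop fuel (bDropGroup p.1 (p :: rest) bal).1 (bDropGroup p.1 (p :: rest) bal).2

def largestBalancedRadius_alt (X : List Int) (Y : List Int) (colors : List String) : Int :=
  let pts := PySem.List.sorted2
    (((X.zip Y).zip colors).map
      (fun p => (p.1.1 * p.1.1 + p.1.2 * p.1.2, if p.2 = "R" then (1 : Int) else -1)))
    (fun p => p.1) (fun p => p.2) false
  bLoop pts.reverse.length pts.reverse ((pts.map (·.2)).sum)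

-- ===== PRECONDITION & SPEC =====
-- A indexes Y[i] and colors[i] for every i < len(X): it raises IndexError iff Y or colors is
-- shorter than X; Pre_ excludes exactly those inputs.
def Pre_largestBalancedRadius (X : List Int) (Y : List Int) (colors : List String) : Prop :=
  X.length ≤ Y.length ∧ X.length ≤ colors.length
instance (X : List Int) (Y : List Int) (colors : List String) : Decidable (Pre_largestBalancedRadius X Y colors) := by unfold Pre_largestBalancedRadius; infer_instance

def pvWitness_largestBalancedRadius : List Int × List Int × List String := ([0, 1], [1, 0], ["R", "B"])

def Spec_largestBalancedRadius (X : List Int) (Y : List Int) (colors : List String) (out : Int) : Prop := out = largestBalancedRadius_alt X Y colors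
instance (X : List Int) (Y : List Int) (colors : List String) (out : Int) : Decidable (Spec_largestBalancedRadius X Y colors out) := by unfold Spec_largestBalancedRadius; infer_instance

-- ===== CLAIM (what is proved, stated in full; the proofs are below) =====
def Claim_equal_largestBalancedRadius : Prop := ∀ (X : List Int) (Y : List Int) (colors : List String), Dom_largestBalancedRadius X Y colors → Pre_largestBalancedRadius X Y colors → Spec_largestBalancedRadius X Y colors (largestBalancedRadius X Y colors)

-- ===== LEMMAS AND PROOFS =====

-- the list of (r², red-flag) pairs A aggregates, in input order
def lbrPairs (X : List Int) (Y : List Int) (colors : List String) : List (Int × Int) :=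
  (PySem.List.pyRange 0 (X.length : Int) 1).map
    (fun i => (PySem.List.pyGetD X i 0 * PySem.List.pyGetD X i 0 +
               PySem.List.pyGetD Y i 0 * PySem.List.pyGetD Y i 0,
               if PySem.List.pyGetD colors i "" = "R" then (1 : Int) else 0))

-- flag pair → sign pair (R-flag 1 ↦ +1, 0 ↦ −1), the value B stores
def toSgn (q : Int × Int) : Int × Int := (q.1, 2 * q.2 - 1)

lemma pairwise_insertBy {α : Type} (before : α → α → Bool) (le : α → α → Prop)
    (htrans : ∀ a b c, le a b → le b c → le a c)
    (h1 : ∀ a b, before a b = true → le a b) (h2 : ∀ a b, before a b = false → le b a)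
    (x : α) : ∀ (ys : List α), ys.Pairwise le → (PySem.List.insertBy before x ys).Pairwise le := by
  intro ys
  induction ys with
  | nil => intro _; simp [PySem.List.insertBy]
  | cons y ys ih =>
    intro hp
    rw [List.pairwise_cons] at hp
    have heq : PySem.List.insertBy before x (y :: ys) =
        if before x y then x :: y :: ys else y :: PySem.List.insertBy before x ys := by
      simp [PySem.List.insertBy]
    rw [heq]
    by_cases hb : before x y = true
    · simp only [hb, if_true]
      refine List.Pairwise.cons ?_ (List.Pairwise.cons hp.1 hp.2)
      intro z hz
      rcases List.mem_cons.mp hz with rfl | hz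
      · exact h1 _ _ hb
      · exact htrans _ _ _ (h1 _ _ hb) (hp.1 z hz)
    · simp only [hb]
      refine List.Pairwise.cons ?_ (ih hp.2)
      intro z hz
      rcases (PySem.List.mem_insertBy before x z ys).mp hz with rfl | hz
      · exact h2 _ _ (by simpa using hb)
      · exact hp.1 z hz

lemma pairwise_foldl_insertBy {α : Type} (before : α → α → Bool) (le : α → α → Prop)
    (htrans : ∀ a b c, le a b → le b c → le a c)
    (h1 : ∀ a b, before a b = true → le a b) (h2 : ∀ a b, before a b = false → le b a) :
    ∀ (xs : List α) (init : List α), init.Pairwise le →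
      (xs.foldl (fun acc x => PySem.List.insertBy before x acc) init).Pairwise le := by
  intro xs
  induction xs with
  | nil => intro init h; simpa using h
  | cons x xs ih =>
    intro init h
    exact ih _ (pairwise_insertBy before le htrans h1 h2 x init h)

lemma sorted2_pairwise_fst (ps : List (Int × Int)) :
    (PySem.List.sorted2 ps (fun p => p.1) (fun p => p.2) false).Pairwise
      (fun a b => a.1 ≤ b.1) := by
  show (ps.foldl (fun acc x => PySem.List.insertBy
      (fun a b => decide (a.1 < b.1) || (!decide (b.1 < a.1) && decide (a.2 < b.2))) x acc) []).Pairwise _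
  refine pairwise_foldl_insertBy
    (fun a b => decide (a.1 < b.1) || (!decide (b.1 < a.1) && decide (a.2 < b.2)))
    (fun (a b : Int × Int) => a.1 ≤ b.1)
    (fun a b c hab hbc => le_trans hab hbc) ?_ ?_ ps [] (by simp)
  · intro a b h
    simp only [Bool.or_eq_true, Bool.and_eq_true, Bool.not_eq_true', decide_eq_true_eq,
      decide_eq_false_iff_not] at h
    rcases h with h | ⟨h, _⟩
    · exact le_of_lt h
    · omega
  · intro a b h
    simp only [Bool.or_eq_false_iff, Bool.and_eq_false_iff, Bool.not_eq_false',
      decide_eq_false_iff_not, decide_eq_true_eq] at h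
    omega

lemma lbrScan_cons (p : Int × Int) (rest : List (Int × Int)) (cnt red ans : Int) :
    lbrScan (p :: rest) cnt red ans =
      lbrScan rest (cnt + 1) (red + p.2)
        (if (red + p.2) * 2 = cnt + 1 ∧ (rest = [] ∨ rest.headI.1 ≠ p.1)
         then max ans (cnt + 1) else ans) := rfl

lemma scan_group (k : Int) :
    ∀ (g : List (Int × Int)), g ≠ [] → (∀ p ∈ g, p.1 = k) →
      ∀ (r : List (Int × Int)), (∀ p ∈ r, p.1 ≠ k) →
      ∀ (cnt red ans : Int),
      lbrScan (g ++ r) cnt red ans =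
        lbrScan r (cnt + (g.length : Int)) (red + (g.map (·.2)).sum)
          (if (red + (g.map (·.2)).sum) * 2 = cnt + (g.length : Int)
           then max ans (cnt + (g.length : Int)) else ans) := by
  intro g
  induction g with
  | nil => intro h; exact absurd rfl h
  | cons x g ih =>
    intro _ hg r hr cnt red ans
    cases g with
    | nil =>
      have hb' : r = [] ∨ r.headI.1 ≠ x.1 := by
        cases r with
        | nil => exact Or.inl rfl
        | cons q r' =>
          refine Or.inr ?_
          have := hr q List.mem_cons_self
          have hx := hg x List.mem_cons_self
          simpa [hx] using this
      rw [List.cons_append, List.nil_append, lbrScan_cons]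
      have h1 : cnt + (([x] : List (Int × Int)).length : Int) = cnt + 1 := by simp
      have h2 : red + (([x] : List (Int × Int)).map (·.2)).sum = red + x.2 := by simp
      rw [h1, h2]
      congr 1
      simp [eq_true hb']
    | cons y g' =>
      rw [List.cons_append, lbrScan_cons]
      rw [if_neg (by
        rintro ⟨-, h | h⟩
        · simp at h
        · apply h
          have hy := hg y (List.mem_cons_of_mem _ List.mem_cons_self)
          have hx := hg x List.mem_cons_self
          simp [hy, hx])]
      rw [ih (by simp) (fun p hp => hg p (List.mem_cons_of_mem _ hp)) r hr]
      have l1 : cnt + 1 + ((y :: g').length : Int) = cnt + ((x :: y :: g').length : Int) := by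
        simp; ring
      have l2 : red + x.2 + ((y :: g').map (·.2)).sum = red + ((x :: y :: g').map (·.2)).sum := by
        simp; ring
      rw [l1, l2]

-- scanning u ++ v when the junction changes key: the standalone scan of u sees the same boundaries
lemma lbrScan_append :
    ∀ (u v : List (Int × Int)), (v ≠ [] → ∀ p ∈ u, v.headI.1 ≠ p.1) →
      ∀ (cnt red ans : Int),
      lbrScan (u ++ v) cnt red ans =
        lbrScan v (cnt + (u.length : Int)) (red + (u.map (·.2)).sum) (lbrScan u cnt red ans) := by
  intro u
  induction u with
  | nil => intro v _ cnt red ans; simp [lbrScan]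
  | cons p u ih =>
    intro v hj cnt red ans
    rw [List.cons_append, lbrScan_cons, lbrScan_cons]
    rw [ih v (fun hv q hq => hj hv q (List.mem_cons_of_mem _ hq))]
    have harith1 : cnt + 1 + (u.length : Int) = cnt + ((p :: u).length : Int) := by
      simp; ring
    have harith2 : red + p.2 + (u.map (·.2)).sum = red + ((p :: u).map (·.2)).sum := by
      simp; ring
    rw [harith1, harith2]
    congr 2
    by_cases hu : u = []
    · subst hu
      cases v with
      | nil => simp
      | cons q v' =>
        have hqp : ¬q.1 = p.1 := by simpa using hj (by simp) p List.mem_cons_self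
        simp [hqp]
    · cases u with
      | nil => exact absurd rfl hu
      | cons q u' => simp

lemma lbrScan_le_max : ∀ (l : List (Int × Int)) (cnt red ans : Int),
    lbrScan l cnt red ans ≤ max ans (cnt + (l.length : Int)) := by
  intro l
  induction l with
  | nil => intro cnt red ans; simp [lbrScan]
  | cons p rest ih =>
    intro cnt red ans
    rw [lbrScan_cons]
    refine le_trans (ih _ _ _) ?_
    have h1 : (if (red + p.2) * 2 = cnt + 1 ∧ (rest = [] ∨ rest.headI.1 ≠ p.1)
        then max ans (cnt + 1) else ans) ≤ max ans (cnt + 1) := by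
      split_ifs <;> simp
    have h0 : (0 : Int) ≤ (rest.length : Int) := by positivity
    have hlen : ((p :: rest).length : Int) = (rest.length : Int) + 1 := by
      push_cast [List.length_cons]; ring
    rw [hlen]
    refine max_le ?_ ?_
    · refine le_trans h1 (max_le (le_max_left _ _) ?_)
      exact le_trans (by omega) (le_max_right _ _)
    · exact le_trans (by omega) (le_max_right _ _)

-- split a DESCENDING list at its head key: the leading run of key k, then strictly smaller keys
lemma split_desc (k : Int) :
    ∀ (es : List (Int × Int)), es.Pairwise (fun a b => b.1 ≤ a.1) →
      (∀ p ∈ es, p.1 = k ∨ p.1 < k) →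
      ∃ g r, es = g ++ r ∧ (∀ p ∈ g, p.1 = k) ∧ (∀ p ∈ r, p.1 < k) := by
  intro es
  induction es with
  | nil => exact fun _ _ => ⟨[], [], rfl, by simp, by simp⟩
  | cons p es ih =>
    intro hp hc
    rw [List.pairwise_cons] at hp
    rcases hc p List.mem_cons_self with hk | hk
    · obtain ⟨g, r, rfl, hg, hr⟩ := ih hp.2 (fun q hq => hc q (List.mem_cons_of_mem _ hq))
      exact ⟨p :: g, r, rfl, by
        intro q hq
        rcases List.mem_cons.mp hq with rfl | hq
        · exact hk
        · exact hg q hq, hr⟩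
    · refine ⟨[], p :: es, rfl, by simp, ?_⟩
      intro q hq
      rcases List.mem_cons.mp hq with rfl | hq
      · exact hk
      · exact lt_of_le_of_lt (hp.1 q hq) hk

-- split an ASCENDING list at its max key k: strictly smaller keys, then the trailing run of key k
lemma split_asc_end (k : Int) :
    ∀ (qs : List (Int × Int)), qs.Pairwise (fun a b => a.1 ≤ b.1) →
      (∀ p ∈ qs, p.1 = k ∨ p.1 < k) →
      ∃ pre g', qs = pre ++ g' ∧ (∀ p ∈ pre, p.1 < k) ∧ (∀ p ∈ g', p.1 = k) := by
  intro qs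
  induction qs with
  | nil => exact fun _ _ => ⟨[], [], rfl, by simp, by simp⟩
  | cons p qs ih =>
    intro hp hc
    rw [List.pairwise_cons] at hp
    rcases hc p List.mem_cons_self with hk | hk
    · refine ⟨[], p :: qs, rfl, by simp, ?_⟩
      intro q hq
      rcases List.mem_cons.mp hq with rfl | hq
      · exact hk
      · rcases hc q (List.mem_cons_of_mem _ hq) with h | h
        · exact h
        · exact absurd (lt_of_lt_of_le h (hk ▸ hp.1 q hq)) (lt_irrefl _)
    · obtain ⟨pre, g', rfl, hpre, hg'⟩ := ih hp.2 (fun q hq => hc q (List.mem_cons_of_mem _ hq))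
      exact ⟨p :: pre, g', rfl, by
        intro q hq
        rcases List.mem_cons.mp hq with rfl | hq
        · exact hk
        · exact hpre q hq, hg'⟩

lemma bDropGroup_spec (k : Int) :
    ∀ (g : List (Int × Int)), (∀ p ∈ g, p.1 = k) →
      ∀ (r : List (Int × Int)), (∀ p ∈ r, p.1 < k) →
      ∀ (bal : Int), bDropGroup k (g ++ r) bal = (r, bal - (g.map (·.2)).sum) := by
  intro g
  induction g with
  | nil =>
    intro _ r hr bal
    cases r with
    | nil => simp [bDropGroup]
    | cons q r' =>
      have := hr q List.mem_cons_self
      simp [bDropGroup, ne_of_lt this]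
  | cons p g ih =>
    intro hg r hr bal
    rw [List.cons_append]
    have hp := hg p List.mem_cons_self
    simp only [bDropGroup, if_pos hp]
    rw [ih (fun q hq => hg q (List.mem_cons_of_mem _ hq)) r hr]
    simp only [List.map_cons, List.sum_cons, Prod.mk.injEq, true_and]
    ring

lemma sum_map_toSgn_snd (l : List (Int × Int)) :
    ((l.map toSgn).map (·.2)).sum = 2 * (l.map (·.2)).sum - (l.length : Int) := by
  induction l with
  | nil => simp
  | cons p l ih =>
    simp only [List.map_cons, List.sum_cons, List.length_cons, ih, toSgn]
    push_cast
    ring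

-- the core: A's ascending max-scan equals B's descending early-exit loop
lemma lbr_core : ∀ (n : Nat) (es qs : List (Int × Int)), es.length ≤ n →
    qs.Pairwise (fun a b => a.1 ≤ b.1) →
    es.Pairwise (fun a b => b.1 ≤ a.1) →
    es.Perm (qs.map toSgn) →
    lbrScan qs 0 0 0 = bLoop n es ((es.map (·.2)).sum) := by
  intro n
  induction n with
  | zero =>
    intro es qs hlen _ _ hperm
    have hes : es = [] := List.eq_nil_of_length_eq_zero (Nat.le_zero.mp hlen)
    subst hes
    have : qs.map toSgn = [] := (List.Perm.nil_eq hperm).symm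
    have hqs : qs = [] := by simpa using this
    subst hqs
    simp [lbrScan, bLoop]
  | succ n ih =>
    intro es qs hlen hqa hed hperm
    cases es with
    | nil =>
      have : qs.map toSgn = [] := (List.Perm.nil_eq hperm).symm
      have hqs : qs = [] := by simpa using this
      subst hqs
      simp [lbrScan, bLoop]
    | cons e tail =>
      have hcd : ∀ p ∈ e :: tail, p.1 = e.1 ∨ p.1 < e.1 := by
        intro p hp
        rcases List.mem_cons.mp hp with rfl | hp
        · exact Or.inl rfl
        · have := (List.pairwise_cons.mp hed).1 p hp
          omega
      obtain ⟨g, r, heq, hg, hr⟩ := split_desc e.1 (e :: tail) hed hcd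
      have hgne : g ≠ [] := by
        intro h
        rw [h, List.nil_append] at heq
        have : e ∈ r := heq ▸ List.mem_cons_self
        exact absurd rfl (ne_of_lt (hr e this))
      -- every key of qs is = e.1 or < e.1
      have hqcd : ∀ p ∈ qs, p.1 = e.1 ∨ p.1 < e.1 := by
        intro p hp
        have hmem : toSgn p ∈ e :: tail :=
          hperm.mem_iff.mpr (List.mem_map.mpr ⟨p, hp, rfl⟩)
        rw [heq] at hmem
        rcases List.mem_append.mp hmem with h | h
        · exact Or.inl (by simpa [toSgn] using hg _ h)
        · exact Or.inr (by simpa [toSgn] using hr _ h)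
      obtain ⟨pre, g', hqe, hpre, hg'⟩ := split_asc_end e.1 qs hqa hqcd
      have hg'ne : g' ≠ [] := by
        intro h
        have he : e ∈ qs.map toSgn := hperm.mem_iff.mp List.mem_cons_self
        obtain ⟨p, hp, hpe⟩ := List.mem_map.mp he
        rw [hqe, h, List.append_nil] at hp
        have h1 : p.1 < e.1 := hpre p hp
        have h2 : p.1 = e.1 := by rw [← hpe]; rfl
        omega
      -- A's value at this step
      have hA : lbrScan qs 0 0 0 =
          if ((qs.map (·.2)).sum) * 2 = (qs.length : Int)
          then max (lbrScan pre 0 0 0) (qs.length : Int)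
          else lbrScan pre 0 0 0 := by
        rw [hqe, lbrScan_append pre g' ?hj 0 0 0]
        case hj =>
          intro hv p hp
          cases g' with
          | nil => exact absurd rfl hv
          | cons q g'' =>
            have hq : q.1 = e.1 := hg' q List.mem_cons_self
            have : p.1 < e.1 := hpre p hp
            simp only [List.headI]
            omega
        rw [show g' = g' ++ [] from (List.append_nil g').symm,
            scan_group e.1 g' (by simpa using hg'ne) (by simpa using hg') [] (by simp)]
        simp only [List.append_nil, lbrScan]
        have hlen' : (0 : Int) + (pre.length : Int) + (g'.length : Int) = (qs.length : Int) := by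
          rw [hqe]; push_cast [List.length_append]; ring
        have hsum' : (0 : Int) + (pre.map (·.2)).sum + (g'.map (·.2)).sum = (qs.map (·.2)).sum := by
          rw [hqe]; simp [List.map_append]
        rw [hsum', hlen']
        rw [← hqe]
      -- balance of es in terms of qs
      have hbal : ((e :: tail).map (·.2)).sum = 2 * (qs.map (·.2)).sum - (qs.length : Int) := by
        rw [(hperm.map (·.2)).sum_eq, sum_map_toSgn_snd]
      have hlen_eq : ((e :: tail).length : Int) = (qs.length : Int) := by
        have := hperm.length_eq
        simp only [List.length_map] at this
        exact_mod_cast this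
      have hB : bLoop (n + 1) (e :: tail) (((e :: tail).map (·.2)).sum) =
          if ((e :: tail).map (·.2)).sum = 0 then (((e :: tail).length : Nat) : Int)
          else bLoop n (bDropGroup e.1 (e :: tail) (((e :: tail).map (·.2)).sum)).1
                 (bDropGroup e.1 (e :: tail) (((e :: tail).map (·.2)).sum)).2 := rfl
      rw [hB, hA]
      by_cases hz : ((e :: tail).map (·.2)).sum = 0
      · rw [if_pos hz, if_pos (by omega)]
        have hle : lbrScan pre 0 0 0 ≤ (qs.length : Int) := by
          have h := lbrScan_le_max pre 0 0 0
          have h2 : (pre.length : Int) ≤ (qs.length : Int) := by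
            rw [hqe]; push_cast [List.length_append]; omega
          have h3 : max (0 : Int) (0 + (pre.length : Int)) = 0 + (pre.length : Int) :=
            max_eq_right (by positivity)
          omega
        rw [max_eq_right hle, hlen_eq]
      · rw [if_neg hz, if_neg (by omega)]
        -- drop the outermost radius group from es and recurse
        have hdrop : bDropGroup e.1 (e :: tail) (((e :: tail).map (·.2)).sum) =
            (r, ((e :: tail).map (·.2)).sum - (g.map (·.2)).sum) := by
          rw [heq]
          exact bDropGroup_spec e.1 g hg r hr _
        rw [hdrop]
        have hsum_gr : ((e :: tail).map (·.2)).sum - (g.map (·.2)).sum = (r.map (·.2)).sum := by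
          rw [heq]; simp [List.map_append]
        rw [hsum_gr]
        -- perm hypothesis for the recursive call, by filtering out the key e.1
        have hfilter : r.Perm (pre.map toSgn) := by
          have hpf := List.Perm.filter (fun p => decide (p.1 ≠ e.1)) hperm
          rw [heq, hqe] at hpf
          rw [List.filter_append] at hpf
          rw [List.filter_eq_nil_iff.mpr (by intro p hp; simp [hg p hp])] at hpf
          rw [List.filter_eq_self.mpr (by intro p hp; simp [ne_of_lt (hr p hp)])] at hpf
          rw [List.map_append, List.filter_append] at hpf
          rw [List.filter_eq_self.mpr (by
            intro q hq
            obtain ⟨p, hp, rfl⟩ := List.mem_map.mp hq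
            simp [toSgn, ne_of_lt (hpre p hp)])] at hpf
          rw [List.filter_eq_nil_iff.mpr (by
            intro q hq
            obtain ⟨p, hp, rfl⟩ := List.mem_map.mp hq
            simp [toSgn, hg' p hp])] at hpf
          simpa using hpf
        have hrlen : r.length ≤ n := by
          have h1 : (e :: tail).length = g.length + r.length := by rw [heq]; simp
          have h2 : 0 < g.length := List.length_pos_iff.mpr hgne
          simp only [List.length_cons] at h1 hlen
          omega
        exact ih r pre hrlen
          (List.pairwise_append.mp (hqe ▸ hqa)).1
          (List.pairwise_append.mp (heq ▸ hed)).2.1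
          hfilter

lemma lbrA_eq (X Y : List Int) (colors : List String) :
    largestBalancedRadius X Y colors =
      lbrScan (PySem.List.sorted2 (lbrPairs X Y colors) (fun p => p.1) (fun p => p.2) false) 0 0 0 := by
  show lbrScan (PySem.List.sorted2
      ((PySem.List.pyRange 0 (X.length : Int) 1).foldl
        (fun t i => t ++ [(PySem.List.pyGetD X i 0 ^ 2 + PySem.List.pyGetD Y i 0 ^ 2,
                           if PySem.List.pyGetD colors i "" = "R" then (1 : Int) else 0)]) [])
      (fun p => p.1) (fun p => p.2) false) 0 0 0 = _
  rw [PySem.List.foldl_append_singleton_eq_map, List.nil_append]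
  rw [show (PySem.List.pyRange 0 (X.length : Int) 1).map
      (fun i => (PySem.List.pyGetD X i 0 ^ 2 + PySem.List.pyGetD Y i 0 ^ 2,
                 if PySem.List.pyGetD colors i "" = "R" then (1 : Int) else 0))
      = lbrPairs X Y colors from by
    unfold lbrPairs
    exact List.map_congr_left (fun i _ => by rw [pow_two, pow_two])]

lemma lbrPairs_nil (Y : List Int) (C : List String) : lbrPairs [] Y C = [] := by
  simp [lbrPairs, PySem.List.pyRange_one_eq_nil]

lemma lbrPairs_cons (x y : Int) (c : String) (X Y : List Int) (C : List String) :
    lbrPairs (x :: X) (y :: Y) (c :: C) =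
      (x * x + y * y, if c = "R" then (1 : Int) else 0) :: lbrPairs X Y C := by
  unfold lbrPairs
  have hn : (((x :: X).length : Nat) : Int) = (X.length : Int) + 1 := by
    push_cast [List.length_cons]; ring
  rw [hn, PySem.List.pyRange_one_cons (by omega), List.map_cons]
  congr 1
  · simp [PySem.List.pyGetD_zero_cons]
  · simp only [zero_add]
    rw [PySem.List.pyRange_one 1 ((X.length : Int) + 1), PySem.List.pyRange_one 0 (X.length : Int),
        List.map_map, List.map_map]
    have harg : ((X.length : Int) + 1 - 1).toNat = ((X.length : Int) - 0).toNat := by omega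
    rw [harg]
    apply List.map_congr_left
    intro k hk
    simp only [Function.comp]
    have e1 : (1 : Int) + (k : Int) = ((k + 1 : Nat) : Int) := by omega
    have e0 : (0 : Int) + (k : Int) = ((k : Nat) : Int) := by omega
    simp only [e1, e0, PySem.List.pyGetD_natCast, List.getD_cons_succ]

lemma zip_sgn : ∀ (X Y : List Int) (C : List String), X.length ≤ Y.length → X.length ≤ C.length →
    ((X.zip Y).zip C).map
        (fun p => (p.1.1 * p.1.1 + p.1.2 * p.1.2, if p.2 = "R" then (1 : Int) else -1))
      = (lbrPairs X Y C).map toSgn := by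
  intro X
  induction X with
  | nil => intro Y C _ _; simp [lbrPairs_nil]
  | cons x X ih =>
    intro Y C hY hC
    cases Y with
    | nil => simp at hY
    | cons y Y =>
      cases C with
      | nil => simp at hC
      | cons c C =>
        rw [List.zip_cons_cons, List.zip_cons_cons, List.map_cons, lbrPairs_cons, List.map_cons]
        congr 1
        · simp only [toSgn]
          split_ifs <;> norm_num
        · exact ih Y C (by simpa using hY) (by simpa using hC)

lemma lbr_main (X Y : List Int) (colors : List String)
    (hY : X.length ≤ Y.length) (hC : X.length ≤ colors.length) :
    largestBalancedRadius X Y colors = largestBalancedRadius_alt X Y colors := by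
  rw [lbrA_eq]
  show _ = bLoop _ _ _
  rw [zip_sgn X Y colors hY hC]
  set tab := lbrPairs X Y colors with htab
  set pts := PySem.List.sorted2 (tab.map toSgn) (fun p => p.1) (fun p => p.2) false with hpts
  have hsumrev : ((pts.map (·.2)).sum : Int) = ((pts.reverse.map (·.2)).sum : Int) := by
    rw [List.map_reverse, List.sum_reverse]
  rw [hsumrev]
  refine lbr_core pts.reverse.length pts.reverse _ le_rfl (sorted2_pairwise_fst tab) ?_ ?_
  · exact List.pairwise_reverse.mpr (sorted2_pairwise_fst (tab.map toSgn))
  · have h1 : pts.reverse.Perm pts := List.reverse_perm pts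
    have h2 : pts.Perm (tab.map toSgn) := PySem.List.sorted2_perm (tab.map toSgn) _ _ false
    have h3 : ((PySem.List.sorted2 tab (fun p => p.1) (fun p => p.2) false).map toSgn).Perm
        (tab.map toSgn) := (PySem.List.sorted2_perm tab _ _ false).map toSgn
    exact (h1.trans h2).trans h3.symm

-- ===== VERDICT (by name: the statement is the Claim_ definition above) =====
theorem largestBalancedRadius_spec : Claim_equal_largestBalancedRadius := by
  intro X Y colors _ hpre
  unfold Spec_largestBalancedRadius
  exact lbr_main X Y colors hpre.1 hpre.2
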